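/-
  THE FIXED BINARIES (proofs/c6/jsmn_fixed.c → proofs/c6/fixed/jsmn_{d,s}.bin): `jsmn_parse` is here a function that CHECKS ITS ARGUMENTS and then
  calls the unchanged body, `jsmn_parse_core`. This file: the two fixed images as `Bin`s, and the contract of the new `jsmn_parse` —
  **`ParseSpecFixed`: the refinement theorem WITHOUT the precondition `Inv` and without fuel** (the model, `Jsmn.parseFixed`, is total:
  Json/Jsmn/Fixed.lean, parseFixed_total).

  TWO VIEWS OF EACH FIXED IMAGE, both plain `Bin`s (so that every contract of Prog/Jsmn/Specs.lean applies as it is):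
    binFD  / binFS     `parse` = the NEW checking jsmn_parse (D 100555H, S 10062EH); what jsmn_run calls; stack budget = the body's + 8 (the `call`)
    binFDc / binFSc    the same image with `parse` = jsmn_parse_core (D 10027AH, S 1002A9H: THE ORIGINAL's address) and the original's stack budget.
  `ParseSpec binFDc n` is the contract of the unchanged body on the fixed image (`CoreSpec`): every byte of the five body functions equals the
  original's at the same address (S: but the jump table's address inside the indirect jmp), so the proofs of
  Prog/Jsmn/D/*, S/* carry over by renaming (tools/port_fixed.sh). The contracts of the callees do not see the difference between the two views:
  `AllocSpec binFDc n` IS `AllocSpec binFD n` (likewise Fill / Prim / Str): `core_alloc` … below, by `Iff.rfl`.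

  Entry addresses: proofs/c6/fixed/jsmn_{d,s}.sym. Stack budgets: the new jsmn_parse pushes nothing and makes one call, so useParse = 8 + the body's
  (D 88 → 96, S 96 → 104), and jsmn_run / jsmn_main each 8 more than in the original images.
-/
import Prog.Jsmn.Specs
import X86.Derived.Prog.MemWords
import Prog.Jsmn.Fixed.JsmnFDBytes
import Prog.Jsmn.Fixed.JsmnFSBytes
import Json.Jsmn.Fixed

namespace X86
namespace J6
open X86.User (CodeAt RegsKept Span FlagsOK Layout toNat_add_ofNat toNat_ofNat_lt' add_ofNat_add)
open Jsmn

set_option linter.unusedVariables false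

/-- fixed/jsmn_d.bin (default configuration): `parse` is the checking jsmn_parse. -/
def binFD : Bin :=
  { cfg := .default, image := JsmnFDBytes.image_bytes, alloc := 0x100040, fill := 0x100076, prim := 0x100086, str := 0x100134, parse := 0x100555,
    init := 0x1005b4, run := 0x1005c9, main := 0x10060a, usePrim := 24, useStr := 24, useParse := 96, useRun := 152, useMain := 168 }

/-- fixed/jsmn_d.bin seen from inside: `parse` is the unchanged body jsmn_parse_core, with the original's stack budget. -/
def binFDc : Bin := { binFD with parse := 0x10027a, useParse := 88 }

/-- fixed/jsmn_s.bin (-DJSMN_STRICT -DJSMN_PARENT_LINKS): `parse` is the checking jsmn_parse. -/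
def binFS : Bin :=
  { cfg := .strictLinks, image := JsmnFSBytes.image_bytes, alloc := 0x100040, fill := 0x10007e, prim := 0x10008e, str := 0x100154, parse := 0x10062e,
    init := 0x1006cb, run := 0x1006e0, main := 0x100721, usePrim := 32, useStr := 32, useParse := 104, useRun := 160, useMain := 176 }

/-- fixed/jsmn_s.bin seen from inside: `parse` is jsmn_parse_core. -/
def binFSc : Bin := { binFS with parse := 0x1002a9, useParse := 96 }

/-! The fields as rewrite rules; `j6f_bin` is `j6_bin` for the four fixed `Bin`s. -/
theorem binFD_cfg : binFD.cfg = .default := rfl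
theorem binFD_image : binFD.image = JsmnFDBytes.image_bytes := rfl
theorem binFD_alloc : binFD.alloc = 0x100040 := rfl
theorem binFD_fill : binFD.fill = 0x100076 := rfl
theorem binFD_prim : binFD.prim = 0x100086 := rfl
theorem binFD_str : binFD.str = 0x100134 := rfl
theorem binFD_parse : binFD.parse = 0x100555 := rfl
theorem binFD_init : binFD.init = 0x1005b4 := rfl
theorem binFD_run : binFD.run = 0x1005c9 := rfl
theorem binFD_main : binFD.main = 0x10060a := rfl
theorem binFD_usePrim : binFD.usePrim = 24 := rfl
theorem binFD_useStr : binFD.useStr = 24 := rfl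
theorem binFD_useParse : binFD.useParse = 96 := rfl
theorem binFD_useRun : binFD.useRun = 152 := rfl
theorem binFD_useMain : binFD.useMain = 168 := rfl
theorem binFDc_cfg : binFDc.cfg = .default := rfl
theorem binFDc_image : binFDc.image = JsmnFDBytes.image_bytes := rfl
theorem binFDc_alloc : binFDc.alloc = 0x100040 := rfl
theorem binFDc_fill : binFDc.fill = 0x100076 := rfl
theorem binFDc_prim : binFDc.prim = 0x100086 := rfl
theorem binFDc_str : binFDc.str = 0x100134 := rfl
theorem binFDc_parse : binFDc.parse = 0x10027a := rfl
theorem binFDc_usePrim : binFDc.usePrim = 24 := rfl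
theorem binFDc_useStr : binFDc.useStr = 24 := rfl
theorem binFDc_useParse : binFDc.useParse = 88 := rfl
theorem binFS_cfg : binFS.cfg = .strictLinks := rfl
theorem binFS_image : binFS.image = JsmnFSBytes.image_bytes := rfl
theorem binFS_alloc : binFS.alloc = 0x100040 := rfl
theorem binFS_fill : binFS.fill = 0x10007e := rfl
theorem binFS_prim : binFS.prim = 0x10008e := rfl
theorem binFS_str : binFS.str = 0x100154 := rfl
theorem binFS_parse : binFS.parse = 0x10062e := rfl
theorem binFS_init : binFS.init = 0x1006cb := rfl
theorem binFS_run : binFS.run = 0x1006e0 := rfl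
theorem binFS_main : binFS.main = 0x100721 := rfl
theorem binFS_usePrim : binFS.usePrim = 32 := rfl
theorem binFS_useStr : binFS.useStr = 32 := rfl
theorem binFS_useParse : binFS.useParse = 104 := rfl
theorem binFS_useRun : binFS.useRun = 160 := rfl
theorem binFS_useMain : binFS.useMain = 176 := rfl
theorem binFSc_cfg : binFSc.cfg = .strictLinks := rfl
theorem binFSc_image : binFSc.image = JsmnFSBytes.image_bytes := rfl
theorem binFSc_alloc : binFSc.alloc = 0x100040 := rfl
theorem binFSc_fill : binFSc.fill = 0x10007e := rfl
theorem binFSc_prim : binFSc.prim = 0x10008e := rfl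
theorem binFSc_str : binFSc.str = 0x100154 := rfl
theorem binFSc_parse : binFSc.parse = 0x1002a9 := rfl
theorem binFSc_usePrim : binFSc.usePrim = 32 := rfl
theorem binFSc_useStr : binFSc.useStr = 32 := rfl
theorem binFSc_useParse : binFSc.useParse = 96 := rfl

/-- Replace the fields of the fixed `Bin`s by their values, everywhere (`j6_bin` for binFD / binFDc / binFS / binFSc). -/
macro "j6f_bin" : tactic => `(tactic| simp (implicitDefEqProofs := false) only [binFD_cfg, binFD_image, binFD_alloc, binFD_fill, binFD_prim, binFD_str,
  binFD_parse, binFD_init, binFD_run, binFD_main, binFD_usePrim, binFD_useStr, binFD_useParse, binFD_useRun, binFD_useMain,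
  binFDc_cfg, binFDc_image, binFDc_alloc, binFDc_fill, binFDc_prim, binFDc_str, binFDc_parse, binFDc_usePrim, binFDc_useStr, binFDc_useParse,
  binFS_cfg, binFS_image, binFS_alloc, binFS_fill, binFS_prim, binFS_str, binFS_parse, binFS_init, binFS_run, binFS_main, binFS_usePrim,
  binFS_useStr, binFS_useParse, binFS_useRun, binFS_useMain,
  binFSc_cfg, binFSc_image, binFSc_alloc, binFSc_fill, binFSc_prim, binFSc_str, binFSc_parse, binFSc_usePrim, binFSc_useStr, binFSc_useParse,
  tokSize_default, tokSize_strictLinks, strict_default, links_default, strict_strictLinks, links_strictLinks,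
  JsmnFDBytes.image_bytes_length, JsmnFSBytes.image_bytes_length] at *)

/-! ### The contracts -/

/-- **The contract of the FIXED `jsmn_parse`: it computes `Jsmn.parseFixed`** — for every parser struct and every token array of `num_tokens`
entries: no `Inv`, no bound on `len`, no fuel (`parseFixed` is total). `num_tokens` is an `unsigned int`: the low half of r8. -/
def ParseSpecFixed (b : Bin) (n : User.Layout) : Prop :=
  ∀ v0 ret pa jsA tb js numTokens p toks r p' toks', ScanPre b n b.parse b.useParse v0 ret pa jsA tb js numTokens p toks →
    Word.low .w32 (v0.reg .r8) = UInt64.ofNat numTokens →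
    parseFixed b.cfg js p toks numTokens = some (r, p', toks') →
    Reach n v0 (ScanPost b b.useParse v0 ret pa tb numTokens toks r p' toks')

/-- The contract of the unchanged body `jsmn_parse_core` on a fixed image: the original's `ParseSpec`, for the image's inside view (`binFDc` / `binFSc`). -/
abbrev CoreSpec (bc : Bin) (n : User.Layout) : Prop := ParseSpec bc n

/-! ### The callees' contracts do not depend on the view

`AllocPre b …`, `Region b …`, `ScanPre b …`, `ScanPost b …` are structures with the `Bin` as a parameter, so the two views of an image give two
different (if field-for-field equal) types: the transfers below rebuild them. `SameCallees b b'`: the two `Bin`s agree on everything the four callee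
contracts mention. -/

/-- The two `Bin`s have the same configuration, image, and callee entries / budgets (they may differ in `parse`, `useParse`, …). -/
structure SameCallees (b b' : Bin) : Prop where
  cfg : b'.cfg = b.cfg
  image : b'.image = b.image
  alloc : b'.alloc = b.alloc
  fill : b'.fill = b.fill
  prim : b'.prim = b.prim
  str : b'.str = b.str
  usePrim : b'.usePrim = b.usePrim
  useStr : b'.useStr = b.useStr

theorem sameCallees_d : SameCallees binFD binFDc := ⟨rfl, rfl, rfl, rfl, rfl, rfl, rfl, rfl⟩
theorem sameCallees_s : SameCallees binFS binFSc := ⟨rfl, rfl, rfl, rfl, rfl, rfl, rfl, rfl⟩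

theorem SameCallees.symm {b b' : Bin} (h : SameCallees b b') : SameCallees b' b :=
  ⟨h.cfg.symm, h.image.symm, h.alloc.symm, h.fill.symm, h.prim.symm, h.str.symm, h.usePrim.symm, h.useStr.symm⟩

/-- A call frame, for an equal image and entry. -/
theorem call_view {n : User.Layout} {image image' : List UInt8} {entry entry' : Word} {use : Nat} {ret : Word} {v0 : User.State} (hi : image' = image)
    (he : entry' = entry) (h : CallPre n 0x100000 image' entry' use ret v0) : CallPre n 0x100000 image entry use ret v0 := by
  subst hi; subst he; exact h

theorem Region.view {b b' : Bin} {n : User.Layout} {v0 : User.State} {use : Nat} {a : Word} {len : Nat} (hi : b'.image = b.image)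
    (h : Region b' n v0 use a len) : Region b n v0 use a len :=
  ⟨h.lo, h.hi, hi ▸ h.img, h.stk⟩

theorem Env.view {b b' : Bin} {n : User.Layout} {v0 : User.State} {use : Nat} {pa jsA tb : Word} {len tlen : Nat} (hi : b'.image = b.image)
    (h : Env b' n v0 use pa jsA len tb tlen) : Env b n v0 use pa jsA len tb tlen :=
  ⟨h.parserR.view hi, h.jsR.view hi, h.toksR.imp_right (Region.view hi), h.parserJs, h.parserToks, h.jsToks⟩

/-- jsmn_alloc_token's contract, transferred between two views of an image. -/
theorem AllocSpec.view {b b' : Bin} {n : User.Layout} (hs : SameCallees b b') (h : AllocSpec b n) : AllocSpec b' n := by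
  obtain ⟨hc, hi, ha, -, -, -, -, -⟩ := hs
  intro v0 ret pa tb numTokens p ts hp
  have hp' : AllocPre b n v0 ret pa tb numTokens p ts :=
    ⟨call_view hi ha hp.call, hp.rdi, hp.rsi, hp.rdx, hp.nlt, hp.parser, hc ▸ hp.toks, hp.tlen, hp.parserR.view hi,
      by have := hp.toksR.view hi; rw [hc] at this; exact this, by have := hp.parserToks; rw [hc] at this; exact this⟩
  have := h v0 ret pa tb numTokens p ts hp'
  unfold AllocPost at this ⊢
  rw [hc]; exact this

/-- jsmn_fill_token's contract, transferred. -/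
theorem FillSpec.view {b b' : Bin} {n : User.Layout} (hs : SameCallees b b') (h : FillSpec b n) : FillSpec b' n := by
  obtain ⟨hc, hi, -, hf, -, -, -, -⟩ := hs
  intro v0 ret tb ts i type start «end» hp
  have hp' : FillPre b n v0 ret tb ts i type start «end» :=
    ⟨call_view hi hf hp.call, by have := hp.rdi; rw [hc] at this; exact this, hp.rsi, hp.rdx, hp.rcx, hp.tylt, hp.startR,
      hp.endR, hp.ilt, hc ▸ hp.toks, by have := hp.toksR.view hi; rw [hc] at this; exact this⟩
  have := h v0 ret tb ts i type start «end» hp'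
  unfold FillPost at this ⊢
  rw [hc]; exact this

/-- The precondition of the three scanning functions, transferred (same entry, same budget). -/
theorem ScanPre.view {b b' : Bin} {n : User.Layout} {entry : Word} {use : Nat} {v0 : User.State} {ret pa jsA tb : Word} {js : List UInt8} {numTokens : Nat}
    {p : Parser} {toks : Option Tokens} (hc : b'.cfg = b.cfg) (hi : b'.image = b.image)
    (h : ScanPre b' n entry use v0 ret pa jsA tb js numTokens p toks) : ScanPre b n entry use v0 ret pa jsA tb js numTokens p toks :=
  ⟨call_view hi rfl h.call, h.rdi, h.rsi, h.rdx, h.rcx, h.nlt, h.jslt, h.text, h.parser, hc ▸ h.toksArg,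
    by have := h.env.view hi; rw [hc] at this; exact this⟩

/-- The postcondition of the three scanning functions, transferred. -/
theorem ScanPost.view {b b' : Bin} {use : Nat} {v0 : User.State} {ret pa tb : Word} {numTokens : Nat} {toks : Option Tokens} {r : Int} {p' : Parser}
    {toks' : Option Tokens} {v : User.State} (hc : b'.cfg = b.cfg) (h : ScanPost b use v0 ret pa tb numTokens toks r p' toks' v) :
    ScanPost b' use v0 ret pa tb numTokens toks r p' toks' v :=
  ⟨by rw [hc]; exact h.ret, h.rax, h.parser, by rw [hc]; exact h.toks⟩

/-- jsmn_parse_primitive's contract, transferred. -/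
theorem PrimSpec.view {b b' : Bin} {n : User.Layout} (hs : SameCallees b b') (h : PrimSpec b n) : PrimSpec b' n := by
  obtain ⟨hc, hi, -, -, hp, -, hu, -⟩ := hs
  intro v0 ret pa jsA tb js numTokens p toks fuel r p' toks' hpre hr8 hm
  rw [hp, hu] at hpre
  rw [hu]
  rw [hc] at hm
  exact (h v0 ret pa jsA tb js numTokens p toks fuel r p' toks' (hpre.view hc hi) hr8 hm).mono fun _ hpost => hpost.view hc

/-- jsmn_parse_string's contract, transferred. -/
theorem StrSpec.view {b b' : Bin} {n : User.Layout} (hs : SameCallees b b') (h : StrSpec b n) : StrSpec b' n := by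
  obtain ⟨hc, hi, -, -, -, hp, -, hu⟩ := hs
  intro v0 ret pa jsA tb js numTokens p toks fuel r p' toks' hpre hr8 hm
  rw [hp, hu] at hpre
  rw [hu]
  rw [hc] at hm
  exact (h v0 ret pa jsA tb js numTokens p toks fuel r p' toks' (hpre.view hc hi) hr8 hm).mono fun _ hpost => hpost.view hc

/-- What is true of any parser struct in memory and any 32-bit `num_tokens`: the numbers fit their C types. -/
theorem typed_of {μ : User.Mem} {pa : Word} {p : Parser} {numTokens : Nat} (h : ParserAt μ pa p) (hn : numTokens < 2 ^ 32) : Typed p numTokens :=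
  ⟨h.pos ▸ User.Mem.readLE4_lt _ _, h.toknext ▸ User.Mem.readLE4_lt _ _, ⟨h.toksuper.2.1, h.toksuper.2.2⟩, hn⟩

/-- The array of a `ToksArg` has `num_tokens` entries. -/
theorem toksArg_len {cfg : Jsmn.Config} {μ : User.Mem} {tb : Word} {numTokens : Nat} {toks : Option Tokens} (h : ToksArg cfg μ tb numTokens toks) :
    ∀ ts, toks = some ts → ts.length = numTokens := by
  intro ts e; subst e; exact h.2.1

end J6
end X86
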